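-- pv_equiv track=rewrite | github.com/Qiskit/qiskit-addon-cutting | circuit_knitting_toolbox/circuit_cutting/wire_cutting/wire_cutting_evaluation.py | mutate_measurement_basis
-- ===== SOURCE A (Python) =====
-- import itertools, copy
-- from typing import Dict, Tuple, Sequence, Optional, List, Any, Union
--
-- def mutate_measurement_basis(meas: Tuple[str, ...]) -> List[Tuple[Any, ...]]:
--     """
--     Change of basis for all identity measurements.
--
--     For every identity measurement, it is split into an I and Z measurement.
--     I and Z measurement basis correspond to the same logical circuit.
--
--     Args:
--         - meas (tuple): the current measurement bases
--
--     Returns: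
--         - (tuple): the update measurement bases
--     """
--     if all(x != "I" for x in meas):
--         return [meas]
--     else:
--         mutated_meas = []
--         for x in meas:
--             if x != "I":
--                 mutated_meas.append([x])
--             else:
--                 mutated_meas.append(["I", "Z"])
--         mutated_meas_out = list(itertools.product(*mutated_meas))
--
--         return mutated_meas_out
-- ===== SOURCE B (Python) =====
-- def mutate_measurement_basis(meas):
--     # Bitmask enumeration: k = number of identity measurements; for each integer
--     # m in [0, 2^k) decode its bits MSB-first into I/Z choices while scanning meas.
--     k = sum(1 for x in meas if x == "I")
--     out = []
--     for m in range(1 << k):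
--         row = []
--         rem = k
--         for x in meas:
--             if x == "I":
--                 rem -= 1
--                 row.append("Z" if (m >> rem) & 1 else "I")
--             else:
--                 row.append(x)
--         out.append(tuple(row))
--     return out
-- ===== Notes on version B (the rewrite author's own statement) =====
-- stated objective: alternative
-- what changed: Replaced the all-non-I early return plus itertools.product over per-position option lists with direct bitmask enumeration: count the k identity positions and, for each integer m in range(2**k), decode m's bits MSB-first into I/Z choices while scanning meas once.
import Mathlib
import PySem

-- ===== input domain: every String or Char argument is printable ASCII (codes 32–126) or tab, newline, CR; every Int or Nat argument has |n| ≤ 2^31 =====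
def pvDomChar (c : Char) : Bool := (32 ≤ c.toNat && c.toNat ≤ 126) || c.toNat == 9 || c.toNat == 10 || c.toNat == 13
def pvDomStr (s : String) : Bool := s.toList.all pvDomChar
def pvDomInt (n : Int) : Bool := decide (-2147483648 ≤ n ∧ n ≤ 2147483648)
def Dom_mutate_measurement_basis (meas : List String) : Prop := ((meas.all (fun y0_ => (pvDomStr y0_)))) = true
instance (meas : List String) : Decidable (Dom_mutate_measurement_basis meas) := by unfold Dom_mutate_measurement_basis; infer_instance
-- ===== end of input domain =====

-- B replaces A's early return + itertools.product with bitmask enumeration over the 2^k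
-- identity positions; objective: alternative (same values, same order, same cost).

-- ===== PORT A =====
-- itertools.product over a list of option lists (first factor outermost), as A uses it
def pyProduct (ls : List (List String)) : List (List String) :=
  match ls with
  | [] => [[]]
  | l :: rest => l.flatMap (fun x => (pyProduct rest).map (fun r => x :: r))

def mutate_measurement_basis (meas : List String) : List (List String) :=
  if meas.all (fun x => x ≠ "I") then
    [meas]
  else
    let mutated_meas := meas.map (fun x => if x ≠ "I" then [x] else ["I", "Z"])
    pyProduct mutated_meas

-- ===== PORT B =====
def mutate_measurement_basis_alt (meas : List String) : List (List String) :=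
  let k := meas.countP (fun x => x = "I")   -- sum(1 for x in meas if x == "I")
  (List.range (1 <<< k)).map (fun m =>
    (meas.foldl (fun (st : List String × Nat) x =>
      if x = "I" then
        let rem := st.2 - 1
        (st.1 ++ [if (m >>> rem) &&& 1 = 1 then "Z" else "I"], rem)
      else
        (st.1 ++ [x], st.2)) ([], k)).1)

-- ===== PRECONDITION & SPEC =====
def Spec_mutate_measurement_basis (meas : List String) (out : List (List String)) : Prop := out = mutate_measurement_basis_alt meas
instance (meas : List String) (out : List (List String)) : Decidable (Spec_mutate_measurement_basis meas out) := by unfold Spec_mutate_measurement_basis; infer_instance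

-- ===== CLAIM (what is proved, stated in full; the proofs are below) =====
def Claim_equal_mutate_measurement_basis : Prop := ∀ (meas : List String), Dom_mutate_measurement_basis meas → Spec_mutate_measurement_basis meas (mutate_measurement_basis meas)

-- ===== LEMMAS AND PROOFS =====

def pvOpts (x : String) : List String := if x ≠ "I" then [x] else ["I", "Z"]

def pvCI (meas : List String) : Nat := meas.countP (fun x => x = "I")

-- reference row: decode m's bits MSB-first (first identity gets the highest bit)
def pvSubst (meas : List String) (m : Nat) : List String :=
  match meas with
  | [] => []
  | x :: xs =>
      if x = "I" then
        (if (m >>> pvCI xs) &&& 1 = 1 then "Z" else "I") :: pvSubst xs m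
      else x :: pvSubst xs m

theorem pvBit_add_pow {c j m : ℕ} (hj : j < c) :
    ((2 ^ c + m) >>> j) &&& 1 = (m >>> j) &&& 1 := by
  simp only [Nat.shiftRight_eq_div_pow, Nat.and_one_is_mod]
  have h1 : 2 ^ c = 2 ^ j * 2 ^ (c - j) := by rw [← pow_add]; congr 1; omega
  rw [h1, Nat.mul_add_div (by positivity)]
  have h2 : 2 ^ (c - j) % 2 = 0 := by
    obtain ⟨t, ht⟩ := Nat.exists_eq_succ_of_ne_zero (show c - j ≠ 0 by omega)
    simp [ht, pow_succ, Nat.mul_mod_left]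
  omega

theorem pvSubst_add_pow (xs : List String) (c m : ℕ) (h : pvCI xs ≤ c) :
    pvSubst xs (2 ^ c + m) = pvSubst xs m := by
  induction xs with
  | nil => rfl
  | cons x xs ih =>
      by_cases hx : x = "I"
      · have hxs : pvCI xs < c := by
          have : pvCI (x :: xs) = pvCI xs + 1 := by simp [pvCI, hx]
          omega
        simp only [pvSubst, if_pos hx, pvBit_add_pow hxs, ih hxs.le]
      · have hxs : pvCI xs ≤ c := by
          have : pvCI (x :: xs) = pvCI xs := by simp [pvCI, hx]
          omega
        simp only [pvSubst, if_neg hx, ih hxs]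

theorem pvBit_high_of_lt {c m : ℕ} (hm : m < 2 ^ c) : (m >>> c) &&& 1 = 0 := by
  simp [Nat.shiftRight_eq_div_pow, Nat.and_one_is_mod, Nat.div_eq_of_lt hm]

theorem pvBit_high_add {c m : ℕ} (hm : m < 2 ^ c) : ((2 ^ c + m) >>> c) &&& 1 = 1 := by
  simp only [Nat.shiftRight_eq_div_pow, Nat.and_one_is_mod]
  rw [Nat.add_comm, Nat.add_div_right _ (by positivity), Nat.div_eq_of_lt hm]

-- A's product equals the bit-decoded enumeration
theorem pvProduct_eq (meas : List String) :
    pyProduct (meas.map pvOpts) = (List.range (2 ^ pvCI meas)).map (pvSubst meas) := by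
  induction meas with
  | nil => simp [pyProduct, pvCI, pvSubst]
  | cons x xs ih =>
      by_cases hx : x = "I"
      · subst hx
        have hc : pvCI ("I" :: xs) = pvCI xs + 1 := by simp [pvCI]
        simp only [List.map_cons, pyProduct, pvOpts, if_neg (show ¬("I" ≠ "I") by decide), ih, hc]
        rw [pow_succ, mul_two, List.range_add]
        simp only [List.map_append, List.map_map, List.flatMap_cons, List.flatMap_nil,
          List.append_nil, List.map_map]
        congr 1
        · apply List.map_congr_left
          intro m hm
          simp only [List.mem_range] at hm
          simp [pvSubst, Function.comp, pvBit_high_of_lt hm]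
        · apply List.map_congr_left
          intro m hm
          simp only [List.mem_range] at hm
          simp [pvSubst, Function.comp, pvBit_high_add hm,
            pvSubst_add_pow xs (pvCI xs) m le_rfl]
      · have hc : pvCI (x :: xs) = pvCI xs := by simp [pvCI, hx]
        simp only [List.map_cons, pyProduct, pvOpts, if_pos (show x ≠ "I" from hx), ih, hc]
        simp only [List.flatMap_cons, List.flatMap_nil, List.append_nil, List.map_map]
        apply List.map_congr_left
        intro m _
        simp [pvSubst, hx, Function.comp]

-- B's inner fold builds exactly the reference row
theorem pvFold_eq (meas : List String) (m : Nat) (row : List String) :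
    meas.foldl (fun (st : List String × Nat) x =>
      if x = "I" then
        (st.1 ++ [if (m >>> (st.2 - 1)) &&& 1 = 1 then "Z" else "I"], st.2 - 1)
      else
        (st.1 ++ [x], st.2)) (row, pvCI meas)
    = (row ++ pvSubst meas m, 0) := by
  induction meas generalizing row with
  | nil => simp [pvCI, pvSubst]
  | cons x xs ih =>
      by_cases hx : x = "I"
      · have hc : pvCI (x :: xs) = pvCI xs + 1 := by simp [pvCI, hx]
        simp only [List.foldl_cons, if_pos hx, hc, Nat.add_sub_cancel]
        rw [ih]
        simp [pvSubst, hx]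
      · have hc : pvCI (x :: xs) = pvCI xs := by simp [pvCI, hx]
        simp only [List.foldl_cons, if_neg hx, hc]
        rw [ih]
        simp [pvSubst, hx]

theorem pvAlt_eq (meas : List String) :
    mutate_measurement_basis_alt meas = (List.range (2 ^ pvCI meas)).map (pvSubst meas) := by
  unfold mutate_measurement_basis_alt
  simp only [Nat.one_shiftLeft]
  apply List.map_congr_left
  intro m _
  have := pvFold_eq meas m []
  simp only [pvCI, Nat.and_one_is_mod] at this
  simp [this]

theorem pvSubst_no_I (meas : List String) (m : Nat)
    (h : meas.all (fun x => x ≠ "I")) : pvSubst meas m = meas := by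
  induction meas with
  | nil => rfl
  | cons x xs ih =>
      simp only [List.all_cons, Bool.and_eq_true, decide_eq_true_eq] at h
      simp [pvSubst, h.1, ih (by simpa using h.2)]

theorem pvCI_no_I (meas : List String) (h : meas.all (fun x => x ≠ "I")) :
    pvCI meas = 0 := by
  rw [pvCI, List.countP_eq_zero]
  intro a ha
  simpa using (List.all_eq_true.mp h) a ha

-- ===== VERDICT (by name: the statement is the Claim_ definition above) =====
theorem mutate_measurement_basis_spec : Claim_equal_mutate_measurement_basis := by
  intro meas _
  unfold Spec_mutate_measurement_basis mutate_measurement_basis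
  rw [pvAlt_eq]
  split_ifs with h
  · rw [pvCI_no_I meas h]
    simp [pvSubst_no_I meas 0 h]
  · show pyProduct (meas.map pvOpts) = _
    rw [pvProduct_eq meas]
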